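-- pv_equiv track=rewrite | github.com/nchylak/capstone-project | 0_cleaning/extract_id_warcs.py | handle_results
-- ===== SOURCE A (Python) =====
-- def handle_results(results, siren_or_siret): # siren is 0 and siret is 1
--     ids = [sublist[siren_or_siret] for sublist in results if len(sublist[siren_or_siret])>0]
--     if len(ids)>0:
--         ids_flat = [item for sublist in ids for item in sublist]
--         ids_final = list(dict.fromkeys(ids_flat))
--     else:
--         ids_final = []
--     return ids_final
-- ===== SOURCE B (Python) =====
-- def handle_results(results, siren_or_siret): # siren is 0 and siret is 1
--     pending = [item for sublist in results for item in sublist[siren_or_siret]]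
--     out = []
--     while pending:
--         head = pending[0]
--         out.append(head)
--         pending = [x for x in pending[1:] if x != head]
--     return out
-- ===== Notes on version B (the rewrite author's own statement) =====
-- stated objective: alternative
-- what changed: Instead of A's staged pipeline (filter comprehension, flatten comprehension, dict.fromkeys dedup behind a redundant emptiness branch), B flattens once and then deduplicates by repeatedly taking the head and filtering all its later duplicates out of the remaining list (no dict/set of seen items is kept).
import Mathlib
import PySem

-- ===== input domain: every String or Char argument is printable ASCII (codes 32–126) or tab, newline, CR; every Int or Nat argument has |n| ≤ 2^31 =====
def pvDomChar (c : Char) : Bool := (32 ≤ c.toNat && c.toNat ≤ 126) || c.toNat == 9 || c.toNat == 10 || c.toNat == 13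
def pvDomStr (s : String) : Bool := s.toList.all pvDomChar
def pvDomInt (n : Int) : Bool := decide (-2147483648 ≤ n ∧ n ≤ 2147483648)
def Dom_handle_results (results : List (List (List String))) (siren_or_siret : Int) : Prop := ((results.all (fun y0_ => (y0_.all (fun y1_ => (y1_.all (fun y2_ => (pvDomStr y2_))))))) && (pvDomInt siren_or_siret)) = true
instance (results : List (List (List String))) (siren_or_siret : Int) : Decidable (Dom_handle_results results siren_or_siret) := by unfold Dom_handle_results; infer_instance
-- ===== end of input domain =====

-- B flattens once and deduplicates by repeatedly taking the head and filtering its later duplicates out of the rest, instead of A's filter/flatten/dict.fromkeys pipeline; objective: alternative (different algorithm, not faster).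


-- ===== PORT A =====
def handle_results (results : List (List (List String))) (siren_or_siret : Int) : List String :=
  let ids := (results.filter (fun sublist =>
      (PySem.List.pyGetD sublist siren_or_siret []).length > 0)).map
      (fun sublist => PySem.List.pyGetD sublist siren_or_siret [])
  if ids.length > 0 then
    let ids_flat := ids.flatMap (fun sublist => sublist)
    PySem.List.dedup ids_flat
  else
    []

-- ===== PORT B =====
-- Source B's while loop: take the head, append it, filter its duplicates out of the rest
def bLoop (pending : List String) (out : List String) : List String :=
  match pending with
  | [] => out
  | head :: rest => bLoop (rest.filter (fun x => x != head)) (out ++ [head])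
termination_by pending.length
decreasing_by simpa using Nat.lt_succ_of_le (List.length_filter_le _ _)

def handle_results_alt (results : List (List (List String))) (siren_or_siret : Int) : List String :=
  bLoop (results.flatMap (fun sublist => PySem.List.pyGetD sublist siren_or_siret [])) []

-- ===== PRECONDITION & SPEC =====
-- Pre_: the Python index sublist[siren_or_siret] must be in range for every sublist (else both raise IndexError)
def Pre_handle_results (results : List (List (List String))) (siren_or_siret : Int) : Prop :=
  ∀ sublist ∈ results, PySem.Raise.InRange sublist.length siren_or_siret
instance (results : List (List (List String))) (siren_or_siret : Int) : Decidable (Pre_handle_results results siren_or_siret) := by unfold Pre_handle_results; infer_instance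
def pvWitness_handle_results : List (List (List String)) × Int := ([[["12"], ["34", "12"]], [[], ["56"]]], 1)

def Spec_handle_results (results : List (List (List String))) (siren_or_siret : Int) (out : List String) : Prop := out = handle_results_alt results siren_or_siret
instance (results : List (List (List String))) (siren_or_siret : Int) (out : List String) : Decidable (Spec_handle_results results siren_or_siret out) := by unfold Spec_handle_results; infer_instance

-- ===== CLAIM =====
def Claim_equal_handle_results : Prop := ∀ (results : List (List (List String))) (siren_or_siret : Int), Dom_handle_results results siren_or_siret → Pre_handle_results results siren_or_siret → Spec_handle_results results siren_or_siret (handle_results results siren_or_siret)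

-- ===== LEMMAS AND PROOFS =====

-- removing all copies of a value commutes with taking first occurrences
lemma ofList_filter_ne (a : String) (xs : List String) :
    PySem.Set.ofList (xs.filter (fun x => x != a))
      = (PySem.Set.ofList xs).filter (fun x => x != a) := by
  induction xs with
  | nil => rfl
  | cons h t ih =>
      by_cases hp : (h != a) = true
      · simp only [List.filter_cons, hp, if_true, PySem.Set.ofList_cons, ih]
        simp only [PySem.Set.discard, List.filter_filter]
        exact congrArg _ (List.filter_congr (fun x _ => by
          simp only [bne, Bool.and_comm]))
      · have ha : h = a := by simpa using hp
        subst ha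
        simp only [List.filter_cons, bne_self_eq_false, Bool.false_eq_true, if_false,
          PySem.Set.ofList_cons, ih]
        simp only [PySem.Set.discard, List.filter_filter]
        exact (List.filter_congr (fun x _ => by
          cases hx : (x == h) <;> simp [bne, hx])).symm

-- first occurrences, computed head-first: dedup (h::t) = h :: dedup (t with h removed)
lemma ofList_cons_filter (h : String) (t : List String) :
    PySem.Set.ofList (h :: t)
      = h :: PySem.Set.ofList (t.filter (fun x => x != h)) := by
  rw [PySem.Set.ofList_cons, ofList_filter_ne]
  rfl

-- B's loop accumulates exactly the ordered dedup of its pending list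
lemma bLoop_eq_aux (n : Nat) : ∀ (pending out : List String), pending.length ≤ n →
    bLoop pending out = out ++ PySem.Set.ofList pending := by
  induction n with
  | zero =>
      intro pending out hlen
      have : pending = [] := List.eq_nil_of_length_eq_zero (Nat.le_zero.mp hlen)
      subst this
      simp [bLoop, PySem.Set.ofList_nil]
  | succ n ih =>
      intro pending out hlen
      cases pending with
      | nil => simp [bLoop, PySem.Set.ofList_nil]
      | cons head rest =>
          rw [bLoop, ih _ _ (le_trans (List.length_filter_le _ _)
              (Nat.lt_succ_iff.mp (by simpa using hlen))), ofList_cons_filter]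
          simp

lemma bLoop_eq (pending : List String) (out : List String) :
    bLoop pending out = out ++ PySem.Set.ofList pending :=
  bLoop_eq_aux pending.length pending out le_rfl

-- flattening the filtered nonempty fields equals flattening all fields
lemma flat_filter (results : List (List (List String))) (i : Int) :
    ((results.filter (fun sublist => (PySem.List.pyGetD sublist i []).length > 0)).map
        (fun sublist => PySem.List.pyGetD sublist i [])).flatMap (fun sublist => sublist)
      = results.flatMap (fun sublist => PySem.List.pyGetD sublist i []) := by
  induction results with
  | nil => rfl
  | cons sub t ih =>
      by_cases h : (PySem.List.pyGetD sub i []).length > 0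
      · simp [h, ih]
      · have hf : PySem.List.pyGetD sub i [] = [] := by
          cases hx : PySem.List.pyGetD sub i [] with
          | nil => rfl
          | cons a b => exact absurd (by simp [hx]) h
        simp [hf, ih]

-- A computes the ordered dedup of the flattened fields (its emptiness branch is redundant)
lemma A_eq (results : List (List (List String))) (i : Int) :
    handle_results results i
      = PySem.List.dedup (results.flatMap (fun sublist => PySem.List.pyGetD sublist i [])) := by
  unfold handle_results
  by_cases h : ((results.filter (fun sublist => (PySem.List.pyGetD sublist i []).length > 0)).map
      (fun sublist => PySem.List.pyGetD sublist i [])).length > 0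
  · simp only [if_pos h, flat_filter]
  · have hnil : (results.filter (fun sublist =>
        (PySem.List.pyGetD sublist i []).length > 0)).map
        (fun sublist => PySem.List.pyGetD sublist i []) = [] := by
      cases hx : (results.filter (fun sublist =>
          (PySem.List.pyGetD sublist i []).length > 0)).map
          (fun sublist => PySem.List.pyGetD sublist i []) with
      | nil => rfl
      | cons a b => exact absurd (by simp [hx]) h
    have hflat : results.flatMap (fun sublist => PySem.List.pyGetD sublist i []) = [] := by
      rw [← flat_filter results i, hnil]; rfl
    simp only [if_neg h]
    rw [hflat]
    rfl

-- ===== VERDICT =====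
theorem handle_results_spec : Claim_equal_handle_results := by
  intro results i _ _
  show handle_results results i = handle_results_alt results i
  rw [A_eq, PySem.List.dedup_eq_ofList]
  unfold handle_results_alt
  rw [bLoop_eq]
  rfl
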